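-- pv_equiv track=rewrite | github.com/assignments-for-discussion/battery-inventory-in-py-jyotsnasharma636 | main.py | count_batteries_by_usage
-- ===== SOURCE A (Python) =====
-- def count_batteries_by_usage(cycles):
--     l=0
--     m=0
--     h=0
--     n=len(cycles)
--     for i in range(n):
--         if(cycles[i]<410):
--             l+=1
--         elif(cycles[i]>=410 and cycles[i]<=909):
--             m+=1
--         elif(cycles[i]>=910):
--             h+=1
--     return {
--     "lowCount": l,
--     "mediumCount": m,
--     "highCount": h
--   }
-- ===== SOURCE B (Python) =====
-- def count_batteries_by_usage(cycles):
--     # sort-then-boundary-scan: find the two bucket boundaries in a sorted copy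
--     s = sorted(cycles)
--     n = len(s)
--     i = 0
--     while i < n and s[i] < 410:
--         i += 1
--     j = i
--     while j < n and s[j] <= 909:
--         j += 1
--     return {"lowCount": i, "mediumCount": j - i, "highCount": n - j}
-- ===== Notes on version B (the rewrite author's own statement) =====
-- stated objective: alternative
-- what changed: B sorts a copy of cycles and finds the two bucket boundary indices in the sorted list, deriving all three counts from those indices, instead of A's single indexed pass with an if/elif chain of counters.
import Mathlib
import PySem

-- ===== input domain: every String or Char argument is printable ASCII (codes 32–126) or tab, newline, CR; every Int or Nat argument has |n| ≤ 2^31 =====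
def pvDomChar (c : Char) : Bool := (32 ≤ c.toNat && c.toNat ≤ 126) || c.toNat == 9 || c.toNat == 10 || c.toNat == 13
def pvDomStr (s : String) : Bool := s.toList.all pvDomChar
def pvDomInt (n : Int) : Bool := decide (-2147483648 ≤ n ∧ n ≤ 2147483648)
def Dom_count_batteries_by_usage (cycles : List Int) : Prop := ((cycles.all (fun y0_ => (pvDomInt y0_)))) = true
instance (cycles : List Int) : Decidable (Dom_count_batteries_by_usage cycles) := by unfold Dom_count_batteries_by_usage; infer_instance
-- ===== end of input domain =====

-- B sorts a copy and reads the three counts off the two boundary indices of the sorted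
-- list, instead of A's single indexed pass with an if/elif chain of counters (objective: alternative).

-- ===== PORT A =====
-- literal port of A's indexed loop; cycles[i] is pyGetD since i ∈ range(0, len) is always in range
def count_batteries_by_usage (cycles : List Int) : List (String × Int) :=
  let st := (PySem.List.pyRange 0 (cycles.length : Int) 1).foldl
    (fun (st : Int × Int × Int) i =>
      let c := PySem.List.pyGetD cycles i 0
      if c < 410 then (st.1 + 1, st.2.1, st.2.2)
      else if 410 ≤ c ∧ c ≤ 909 then (st.1, st.2.1 + 1, st.2.2)
      else if 910 ≤ c then (st.1, st.2.1, st.2.2 + 1)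
      else st) (0, 0, 0)
  [("lowCount", st.1), ("mediumCount", st.2.1), ("highCount", st.2.2)]

-- ===== PORT B =====
-- the first while loop of Source B: advance i past the elements < 410
def pvScanLow (s : List Int) (i : Nat) : Nat :=
  if h : i < s.length ∧ s.getD i 0 < 410 then pvScanLow s (i + 1) else i
termination_by s.length - i
decreasing_by omega

-- the second while loop of Source B: advance j past the elements ≤ 909
def pvScanMed (s : List Int) (j : Nat) : Nat :=
  if h : j < s.length ∧ s.getD j 0 ≤ 909 then pvScanMed s (j + 1) else j
termination_by s.length - j
decreasing_by omega

def count_batteries_by_usage_alt (cycles : List Int) : List (String × Int) :=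
  let s := PySem.List.sorted cycles (fun x => x) false
  let n := s.length
  let i := pvScanLow s 0
  let j := pvScanMed s i
  [("lowCount", (i : Int)), ("mediumCount", (j : Int) - (i : Int)),
   ("highCount", (n : Int) - (j : Int))]

-- ===== PRECONDITION & SPEC =====
def Spec_count_batteries_by_usage (cycles : List Int) (out : List (String × Int)) : Prop := out = count_batteries_by_usage_alt cycles
instance (cycles : List Int) (out : List (String × Int)) : Decidable (Spec_count_batteries_by_usage cycles out) := by unfold Spec_count_batteries_by_usage; infer_instance

-- ===== CLAIM (what is proved, stated in full; the proofs are below) =====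
def Claim_equal_count_batteries_by_usage : Prop := ∀ (cycles : List Int), Dom_count_batteries_by_usage cycles → Spec_count_batteries_by_usage cycles (count_batteries_by_usage cycles)

-- ===== LEMMAS AND PROOFS =====

-- a countP boundary characterisation: if the first i positions satisfy p and the rest do not,
-- then countP p = i
theorem pv_countP_boundary (p : Int → Bool) (s : List Int) (i : Nat) (hi : i ≤ s.length)
    (h1 : ∀ k (hk : k < s.length), k < i → p s[k])
    (h2 : ∀ k (hk : k < s.length), i ≤ k → ¬ p s[k]) :
    s.countP p = i := by
  have hsplit : s = s.take i ++ s.drop i := (List.take_append_drop i s).symm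
  rw [hsplit, List.countP_append]
  have htake : (s.take i).countP p = (s.take i).length := by
    rw [List.countP_eq_length]
    intro a ha
    obtain ⟨k, hk, rfl⟩ := List.mem_iff_getElem.1 ha
    have hkm : k < min i s.length := by simpa using hk
    have hk' : k < s.length := by omega
    have hki : k < i := by omega
    have := h1 k hk' hki
    simpa [List.getElem_take] using this
  have hdrop : (s.drop i).countP p = 0 := by
    rw [List.countP_eq_zero]
    intro a ha
    obtain ⟨k, hk, rfl⟩ := List.mem_iff_getElem.1 ha
    have hk' : i + k < s.length := by
      have hkm : k < s.length - i := by simpa using hk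
      omega
    have := h2 (i + k) hk' (by omega)
    simpa [List.getElem_drop] using this
  rw [htake, hdrop, List.length_take]
  omega

theorem pv_sorted_getElem_le (s : List Int) (hs : s.Pairwise (· ≤ ·)) (a b : Nat)
    (hab : a ≤ b) (hb : b < s.length) : s[a]'(by omega) ≤ s[b] := by
  rcases Nat.eq_or_lt_of_le hab with rfl | hlt
  · exact le_refl _
  · exact List.pairwise_iff_getElem.1 hs a b (by omega) hb hlt

theorem pvScanLow_eq (s : List Int) (hs : s.Pairwise (· ≤ ·)) (i : Nat) (hi : i ≤ s.length)
    (hpre : ∀ k (hk : k < s.length), k < i → s[k] < 410) :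
    pvScanLow s i = s.countP (fun c => decide (c < 410)) := by
  rw [pvScanLow]
  split
  · next h =>
    apply pvScanLow_eq s hs (i + 1) (by omega)
    intro k hk hki
    rcases Nat.lt_or_ge k i with hk' | hk'
    · exact hpre k hk hk'
    · have hk'' : k = i := by omega
      subst hk''
      have h2 := h.2
      rwa [List.getD_eq_getElem s 0 hk] at h2
  · next h =>
    symm
    apply pv_countP_boundary _ s i hi
    · intro k hk hki; simpa using hpre k hk hki
    · intro k hk hik
      have hil : i < s.length := by omega
      have hsi : ¬ s.getD i 0 < 410 := by
        intro hc; exact h ⟨hil, hc⟩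
      rw [List.getD_eq_getElem s 0 hil] at hsi
      have := pv_sorted_getElem_le s hs i k hik hk
      simp; omega
termination_by s.length - i
decreasing_by omega

theorem pvScanMed_eq (s : List Int) (hs : s.Pairwise (· ≤ ·)) (j : Nat) (hj : j ≤ s.length)
    (hpre : ∀ k (hk : k < s.length), k < j → s[k] ≤ 909) :
    pvScanMed s j = s.countP (fun c => decide (c ≤ 909)) := by
  rw [pvScanMed]
  split
  · next h =>
    apply pvScanMed_eq s hs (j + 1) (by omega)
    intro k hk hkj
    rcases Nat.lt_or_ge k j with hk' | hk'
    · exact hpre k hk hk'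
    · have hk'' : k = j := by omega
      subst hk''
      have h2 := h.2
      rwa [List.getD_eq_getElem s 0 hk] at h2
  · next h =>
    symm
    apply pv_countP_boundary _ s j hj
    · intro k hk hkj; simpa using hpre k hk hkj
    · intro k hk hjk
      have hjl : j < s.length := by omega
      have hsj : ¬ s.getD j 0 ≤ 909 := by
        intro hc; exact h ⟨hjl, hc⟩
      rw [List.getD_eq_getElem s 0 hjl] at hsj
      have := pv_sorted_getElem_le s hs j k hjk hk
      simp; omega
termination_by s.length - j
decreasing_by omega

-- A's fold adds the three bucket counts to the accumulator
theorem pv_fold_counts (l : List Int) : ∀ (a b c : Int),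
    l.foldl (fun (st : Int × Int × Int) x =>
      if x < 410 then (st.1 + 1, st.2.1, st.2.2)
      else if 410 ≤ x ∧ x ≤ 909 then (st.1, st.2.1 + 1, st.2.2)
      else if 910 ≤ x then (st.1, st.2.1, st.2.2 + 1)
      else st) (a, b, c)
    = (a + (l.countP (fun x => decide (x < 410)) : Int),
       b + (l.countP (fun x => (decide (410 ≤ x) && decide (x ≤ 909))) : Int),
       c + (l.countP (fun x => decide (910 ≤ x)) : Int)) := by
  induction l with
  | nil => intro a b c; simp
  | cons x t ih =>
    intro a b c
    simp only [List.foldl_cons, List.countP_cons]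
    by_cases h1 : x < 410
    · rw [if_pos h1, ih]
      simp only [h1]
      have h2 : ¬ (410 ≤ x ∧ x ≤ 909) := by omega
      have h3 : ¬ (910 ≤ x) := by omega
      simp [h2, h3]
      ring_nf
    · rw [if_neg h1]
      by_cases h2 : 410 ≤ x ∧ x ≤ 909
      · rw [if_pos h2, ih]
        have h3 : ¬ (910 ≤ x) := by omega
        simp [h1, h2, h3]
        ring_nf
      · rw [if_neg h2]
        have h3 : 910 ≤ x := by omega
        rw [if_pos h3, ih]
        simp [h1, h2, h3]
        ring_nf

-- splitting the ≤ 909 count, and the whole length, at the bucket boundaries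
theorem pv_count_split (l : List Int) :
    l.countP (fun c => decide (c ≤ 909))
      = l.countP (fun c => decide (c < 410)) + l.countP (fun c => (decide (410 ≤ c) && decide (c ≤ 909))) := by
  induction l with
  | nil => simp
  | cons x t ih =>
    simp only [List.countP_cons, ih]
    by_cases h1 : x < 410
    · have h2 : ¬ 410 ≤ x := by omega
      have h3 : x ≤ 909 := by omega
      simp [h1, h2, h3]
      omega
    · have h1' : 410 ≤ x := by omega
      by_cases h2 : x ≤ 909
      · simp [h1, h1', h2]
        omega
      · simp [h1, h1', h2]

theorem pv_length_split (l : List Int) :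
    l.length = l.countP (fun c => decide (c ≤ 909)) + l.countP (fun c => decide (910 ≤ c)) := by
  induction l with
  | nil => simp
  | cons x t ih =>
    simp only [List.countP_cons, List.length_cons, ih]
    by_cases h1 : x ≤ 909
    · have h2 : ¬ 910 ≤ x := by omega
      simp [h1, h2]
      omega
    · have h2 : 910 ≤ x := by omega
      simp [h1, h2]
      omega

-- ===== VERDICT (by name: the statement is the Claim_ definition above) =====
theorem count_batteries_by_usage_spec : Claim_equal_count_batteries_by_usage := by
  intro cycles _
  unfold Spec_count_batteries_by_usage count_batteries_by_usage count_batteries_by_usage_alt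
  set s := PySem.List.sorted cycles (fun x => x) false with hsdef
  have hperm : s.Perm cycles := PySem.List.sorted_perm cycles (fun x => x) false
  have hpw : s.Pairwise (· ≤ ·) := PySem.List.sorted_pairwise cycles (fun x => x)
  have hlen : s.length = cycles.length := hperm.length_eq
  have hLow : pvScanLow s 0 = s.countP (fun c => decide (c < 410)) :=
    pvScanLow_eq s hpw 0 (by omega) (by intro k hk hki; omega)
  have hMed : pvScanMed s (pvScanLow s 0) = s.countP (fun c => decide (c ≤ 909)) := by
    apply pvScanMed_eq s hpw _ ?_ ?_
    · rw [hLow]; exact List.countP_le_length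
    · intro k hk hki
      rw [hLow] at hki
      have hb := pv_countP_boundary (fun c => decide (c < 410)) s
      -- elements at positions below the low boundary are < 410 hence ≤ 909
      -- use: countP boundary gives: if s[k] were > 909 then all elements ≤ k-position counts…
      -- direct argument: suppose s[k] > 909; then by sortedness every position ≥ k fails (·<410),
      -- and positions < k with value < 410 are at most k, so countP ≤ k < countP, contradiction
      by_contra hgt
      rw [not_le] at hgt
      have hcnt : s.countP (fun c => decide (c < 410)) ≤ k := by
        have : s.countP (fun c => decide (c < 410))
            = (s.take k).countP (fun c => decide (c < 410))
              + (s.drop k).countP (fun c => decide (c < 410)) := by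
          conv_lhs => rw [← List.take_append_drop k s]
          rw [List.countP_append]
        have hdz : (s.drop k).countP (fun c => decide (c < 410)) = 0 := by
          rw [List.countP_eq_zero]
          intro a ha
          obtain ⟨m, hm, rfl⟩ := List.mem_iff_getElem.1 ha
          have hm' : k + m < s.length := by
            have hkm : m < s.length - k := by simpa using hm
            omega
          have hle := pv_sorted_getElem_le s hpw k (k + m) (by omega) hm'
          rw [List.getElem_drop]
          simp; omega
        have htk : (s.take k).countP (fun c => decide (c < 410)) ≤ k := by
          calc (s.take k).countP _ ≤ (s.take k).length := List.countP_le_length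
            _ ≤ k := by simp
        omega
      omega
  dsimp only
  rw [PySem.List.foldl_pyRange_zero_pyGetD' cycles 0
    (fun (st : Int × Int × Int) c =>
      if c < 410 then (st.1 + 1, st.2.1, st.2.2)
      else if 410 ≤ c ∧ c ≤ 909 then (st.1, st.2.1 + 1, st.2.2)
      else if 910 ≤ c then (st.1, st.2.1, st.2.2 + 1)
      else st) (0, 0, 0)]
  rw [pv_fold_counts]
  rw [hLow] at hMed
  rw [hLow, hMed]
  have c1 := hperm.countP_eq (fun c => decide (c < 410))
  have c2 := hperm.countP_eq (fun c => decide (c ≤ 909))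
  have e1 := pv_count_split cycles
  have e2 := pv_length_split cycles
  simp only [c1, c2, hlen, zero_add, List.cons.injEq, Prod.mk.injEq, and_true, true_and]
  omega
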